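-- pv_equiv track=rewrite | github.com/jroxenhed/strategylab | bin/sync-todo-index.py | replace_generated_sections
-- ===== SOURCE A (Python) =====
-- GENERATED_SECTION_PREFIXES = ("## Critical (P1)", "## Up Next", "## Open Work")
--
-- def _is_generated_h2(stripped: str) -> bool:
--     return any(stripped.startswith(p) for p in GENERATED_SECTION_PREFIXES)
--
-- def find_generated_block(lines: list[str]) -> tuple[int, int]:
--     start = -1
--     for i, line in enumerate(lines):
--         stripped = line.rstrip()
--         if _is_generated_h2(stripped):
--             if start == -1:
--                 start = i
--         elif start != -1:
--             if stripped.startswith('## ') and not _is_generated_h2(stripped):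
--                 return start, i
--     return start, len(lines)
--
-- def first_real_h2(lines: list[str]) -> int:
--     for i, line in enumerate(lines):
--         stripped = line.rstrip()
--         if stripped.startswith('## ') and not _is_generated_h2(stripped):
--             return i
--     return len(lines)
--
-- def replace_generated_sections(lines: list[str], new_block: str) -> list[str]:
--     start, end = find_generated_block(lines)
--     new_lines = [l + '\n' for l in new_block.split('\n')]
--     while new_lines and new_lines[-1].strip() == '':
--         new_lines.pop()
--     new_lines.append('\n')
--
--     if start != -1:
--         return lines[:start] + new_lines + lines[end:]
--     else:
--         insert_at = first_real_h2(lines)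
--         return lines[:insert_at] + new_lines + lines[insert_at:]
-- ===== SOURCE B (Python) =====
-- GENERATED_SECTION_PREFIXES = ("## Critical (P1)", "## Up Next", "## Open Work")
--
-- def replace_generated_sections(lines: list[str], new_block: str) -> list[str]:
--     # Streaming rewriter: a three-state machine emits the output in one pass,
--     # instead of computing indices with helper scans and splicing slices.
--     def is_gen(s):
--         return s.startswith(GENERATED_SECTION_PREFIXES)
--
--     new_lines = [l + '\n' for l in new_block.split('\n')]
--     while new_lines and new_lines[-1].strip() == '':
--         new_lines.pop()
--     new_lines.append('\n')
--
--     has_gen = any(is_gen(l.rstrip()) for l in lines)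
--     out = []
--     state = 0  # 0 = copying before the block, 1 = skipping the old block, 2 = copying after
--     for line in lines:
--         s = line.rstrip()
--         if state == 0:
--             if has_gen:
--                 if is_gen(s):
--                     out.extend(new_lines)
--                     state = 1
--                 else:
--                     out.append(line)
--             elif s.startswith('## '):
--                 out.extend(new_lines)
--                 out.append(line)
--                 state = 2
--             else:
--                 out.append(line)
--         elif state == 1:
--             if s.startswith('## ') and not is_gen(s):
--                 out.append(line)
--                 state = 2
--         else:
--             out.append(line)
--     if state == 0:
--         out.extend(new_lines)
--     return out
-- ===== Notes on version B (the rewrite author's own statement) =====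
-- stated objective: faster
-- what changed: B replaces A's index-computing helper scans plus slice splicing by a streaming rewriter: a three-state machine (copy-before / skip-old-block / copy-after) that emits the output list directly in one pass, with an any() precheck deciding whether a generated block exists.
import Mathlib
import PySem

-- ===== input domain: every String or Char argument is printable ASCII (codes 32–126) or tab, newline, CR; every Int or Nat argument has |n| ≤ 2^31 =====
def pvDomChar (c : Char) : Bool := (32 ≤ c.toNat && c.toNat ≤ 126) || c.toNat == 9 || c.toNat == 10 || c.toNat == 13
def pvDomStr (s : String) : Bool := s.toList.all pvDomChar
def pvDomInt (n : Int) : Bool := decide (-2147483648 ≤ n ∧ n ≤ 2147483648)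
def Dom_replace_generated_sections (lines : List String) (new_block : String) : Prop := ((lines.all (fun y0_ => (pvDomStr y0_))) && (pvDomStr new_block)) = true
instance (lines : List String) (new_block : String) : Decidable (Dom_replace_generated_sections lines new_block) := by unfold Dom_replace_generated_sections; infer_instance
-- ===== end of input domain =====

-- B replaces A's index-computing scans + slice splicing by a streaming three-state rewriter emitting the output in one pass; return value only, no argument is mutated.

-- shared helper: a stripped line starts with one of GENERATED_SECTION_PREFIXES
def pvIsGen (s : String) : Bool :=
  ["## Critical (P1)", "## Up Next", "## Open Work"].any (fun p => PySem.Str.startswith s p)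

-- shared helper: the identical `while new_lines and new_lines[-1].strip() == '': new_lines.pop()` loop of both Pythons
def pvPopBlanks (xs : List String) : List String :=
  match h : xs.getLast? with
  | none => xs
  | some l => if PySem.Str.strip l == "" then pvPopBlanks xs.dropLast else xs
termination_by xs.length
decreasing_by
  cases xs with
  | nil => simp at h
  | cons a t => simp [List.length_dropLast]

-- ===== PORT A =====
-- find_generated_block's loop (the early return is ported as returning the pair)
def pvFgbAux (ls : List String) (i : Int) (start : Int) : Int × Int :=
  match ls with
  | [] => (start, i)
  | l :: rest =>
    let s := PySem.Str.rstrip l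
    if pvIsGen s then
      pvFgbAux rest (i+1) (if start = -1 then i else start)
    else if start ≠ -1 then
      if PySem.Str.startswith s "## " && !(pvIsGen s) then (start, i)
      else pvFgbAux rest (i+1) start
    else pvFgbAux rest (i+1) start

-- first_real_h2's loop
def pvFirstRealAux (ls : List String) (i : Int) : Int :=
  match ls with
  | [] => i
  | l :: rest =>
    let s := PySem.Str.rstrip l
    if PySem.Str.startswith s "## " && !(pvIsGen s) then i
    else pvFirstRealAux rest (i+1)

def replace_generated_sections (lines : List String) (new_block : String) : List String :=
  let se := pvFgbAux lines 0 (-1)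
  let start := se.1
  let end_ := se.2
  let new_lines := pvPopBlanks (((PySem.Str.split? new_block "\n").getD []).map (fun l => l ++ "\n")) ++ ["\n"]
  if start ≠ -1 then
    PySem.List.slice lines none (some start) ++ new_lines ++ PySem.List.slice lines (some end_) none
  else
    let insert_at := pvFirstRealAux lines 0
    PySem.List.slice lines none (some insert_at) ++ new_lines ++ PySem.List.slice lines (some insert_at) none

-- ===== PORT B =====
-- the streaming state machine of B: state 0 = copying before the block,
-- state 1 = skipping the old generated block, state 2 = copying after it;
-- the `out` accumulator of the Python loop is the emitted prefix of the result
def pvEmit (block : List String) (hasGen : Bool) (state : Nat) (ls : List String) : List String :=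
  match ls with
  | [] => match state with | 0 => block | _ => []
  | l :: rest =>
    let s := PySem.Str.rstrip l
    match state with
    | 0 =>
      if hasGen then
        if pvIsGen s then block ++ pvEmit block hasGen 1 rest
        else l :: pvEmit block hasGen 0 rest
      else if PySem.Str.startswith s "## " then block ++ l :: pvEmit block hasGen 2 rest
      else l :: pvEmit block hasGen 0 rest
    | 1 =>
      if PySem.Str.startswith s "## " && !(pvIsGen s) then l :: pvEmit block hasGen 2 rest
      else pvEmit block hasGen 1 rest
    | _ => l :: pvEmit block hasGen 2 rest

def replace_generated_sections_alt (lines : List String) (new_block : String) : List String :=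
  let new_lines := pvPopBlanks (((PySem.Str.split? new_block "\n").getD []).map (fun l => l ++ "\n")) ++ ["\n"]
  let hasGen := lines.any (fun l => pvIsGen (PySem.Str.rstrip l))
  pvEmit new_lines hasGen 0 lines

-- ===== PRECONDITION & SPEC =====
def Spec_replace_generated_sections (lines : List String) (new_block : String) (out : List String) : Prop := out = replace_generated_sections_alt lines new_block
instance (lines : List String) (new_block : String) (out : List String) : Decidable (Spec_replace_generated_sections lines new_block out) := by unfold Spec_replace_generated_sections; infer_instance

-- ===== CLAIM (what is proved, stated in full; the proofs are below) =====
def Claim_equal_replace_generated_sections : Prop := ∀ (lines : List String) (new_block : String), Dom_replace_generated_sections lines new_block → Spec_replace_generated_sections lines new_block (replace_generated_sections lines new_block)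

-- ===== LEMMAS AND PROOFS =====

-- abbreviations used only by the proofs
def pvG (l : String) : Bool := pvIsGen (PySem.Str.rstrip l)
def pvH (l : String) : Bool := PySem.Str.startswith (PySem.Str.rstrip l) "## " && !(pvIsGen (PySem.Str.rstrip l))

-- number of lines skipped by A after start is set, until the first real h2
def pvIdxH : List String → Nat
  | [] => 0
  | l :: r => if pvH l then 0 else pvIdxH r + 1

-- Nat-level mirror of find_generated_block: none = no generated line
def pvFgbN : List String → Option (Nat × Nat)
  | [] => none
  | l :: r => if pvG l then some (0, 1 + pvIdxH r)
              else (pvFgbN r).map (fun p => (p.1 + 1, p.2 + 1))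

-- Nat-level mirror of first_real_h2
def pvIdxR : List String → Nat
  | [] => 0
  | l :: r => if pvH l then 0 else pvIdxR r + 1

theorem pvFgb_mid (ls : List String) : ∀ (i s : Int), s ≠ -1 →
    pvFgbAux ls i s = (s, i + (pvIdxH ls : Int)) := by
  induction ls with
  | nil => intro i s _; simp [pvFgbAux, pvIdxH]
  | cons l r ih =>
    intro i s hs
    by_cases h1 : pvIsGen (PySem.Str.rstrip l) = true
    · have hH : pvH l = false := by simp [pvH, h1]
      simp only [pvFgbAux, pvIdxH, hH, if_false, if_pos h1, if_neg (show ¬ s = -1 from hs)]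
      rw [ih (i+1) s hs]
      simp; push_cast; omega
    · by_cases h2 : pvH l = true
      · have h2' : (PySem.Str.startswith (PySem.Str.rstrip l) "## " && !(pvIsGen (PySem.Str.rstrip l))) = true := h2
        simp only [pvFgbAux, pvIdxH, h2, if_true, if_neg h1, if_pos hs, if_pos h2']
        simp
      · have h2' : ¬ (PySem.Str.startswith (PySem.Str.rstrip l) "## " && !(pvIsGen (PySem.Str.rstrip l))) = true := h2
        simp only [pvFgbAux, pvIdxH, h2, if_false, if_neg h1, if_pos hs, if_neg h2']
        rw [ih (i+1) s hs]
        simp; push_cast; omega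

theorem pvFgb_eq (ls : List String) : ∀ (i : Int), 0 ≤ i →
    pvFgbAux ls i (-1) =
      match pvFgbN ls with
      | none => (-1, i + (ls.length : Int))
      | some (s, e) => (i + (s : Int), i + (e : Int)) := by
  induction ls with
  | nil => intro i _; simp [pvFgbAux, pvFgbN]
  | cons l r ih =>
    intro i hi
    by_cases h1 : pvIsGen (PySem.Str.rstrip l) = true
    · have hne : (i : Int) ≠ -1 := by omega
      have hG : pvG l = true := h1
      simp only [pvFgbAux, pvFgbN, if_pos h1, hG, if_true]
      rw [pvFgb_mid r (i+1) i hne]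
      simp [Prod.ext_iff]; push_cast; omega
    · simp only [pvFgbAux, pvFgbN, if_neg h1,
        if_neg (show ¬ (-1 : Int) ≠ -1 by simp)]
      rw [ih (i+1) (by omega)]
      cases hfg : pvFgbN r with
      | none =>
        have hG : pvG l = false := by simpa [pvG] using h1
        simp [hfg, hG, Prod.ext_iff]; push_cast; omega
      | some p =>
        cases p with
        | mk s e =>
          have hG : pvG l = false := by simpa [pvG] using h1
          simp [hfg, hG, Prod.ext_iff]
          constructor <;> (push_cast; omega)

theorem pvFirstReal_eq (ls : List String) : ∀ (i : Int),
    pvFirstRealAux ls i = i + (pvIdxR ls : Int) := by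
  induction ls with
  | nil => intro i; simp [pvFirstRealAux, pvIdxR]
  | cons l r ih =>
    intro i
    by_cases h : pvH l = true
    · have h' : (PySem.Str.startswith (PySem.Str.rstrip l) "## " && !(pvIsGen (PySem.Str.rstrip l))) = true := h
      simp only [pvFirstRealAux, pvIdxR, h, if_true, if_pos h']
      simp
    · have h' : ¬ (PySem.Str.startswith (PySem.Str.rstrip l) "## " && !(pvIsGen (PySem.Str.rstrip l))) = true := h
      simp only [pvFirstRealAux, pvIdxR, h, if_false, if_neg h']
      rw [ih (i+1)]; push_cast; omega

theorem pvFgbN_none_iff (ls : List String) :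
    pvFgbN ls = none ↔ ls.any (fun l => pvIsGen (PySem.Str.rstrip l)) = false := by
  induction ls with
  | nil => simp [pvFgbN]
  | cons l r ih =>
    by_cases h : pvG l = true
    · have h' : pvIsGen (PySem.Str.rstrip l) = true := h
      simp [pvFgbN, h, h']
    · have h' : pvIsGen (PySem.Str.rstrip l) = false := by simpa [pvG] using h
      simp [pvFgbN, h, h', ih]

theorem pvEmit2 (b : List String) (hg : Bool) (ls : List String) : pvEmit b hg 2 ls = ls := by
  induction ls with
  | nil => simp [pvEmit]
  | cons l r ih => simp [pvEmit, ih]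

theorem pvEmit1 (b : List String) (hg : Bool) (ls : List String) :
    pvEmit b hg 1 ls = ls.drop (pvIdxH ls) := by
  induction ls with
  | nil => simp [pvEmit, pvIdxH]
  | cons l r ih =>
    by_cases h : pvH l = true
    · have h' : (PySem.Str.startswith (PySem.Str.rstrip l) "## " && !(pvIsGen (PySem.Str.rstrip l))) = true := h
      simp only [pvEmit, reduceIte, pvIdxH, h, if_true, if_pos h', pvEmit2, List.drop_zero]
    · have h' : ¬ (PySem.Str.startswith (PySem.Str.rstrip l) "## " && !(pvIsGen (PySem.Str.rstrip l))) = true := h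
      simp only [pvEmit, reduceIte, pvIdxH, h, Bool.false_eq_true, if_false, if_neg h', ih,
        List.drop_succ_cons]

theorem pvEmitGen (b : List String) (ls : List String) : ∀ s e, pvFgbN ls = some (s, e) →
    List.take s ls ++ b ++ List.drop e ls = pvEmit b true 0 ls := by
  induction ls with
  | nil => intro s e h; simp [pvFgbN] at h
  | cons l r ih =>
    intro s e h
    by_cases hg : pvG l = true
    · have hg' : pvIsGen (PySem.Str.rstrip l) = true := hg
      simp [pvFgbN, hg] at h
      obtain ⟨hs, he⟩ := h
      subst hs he
      simp [pvEmit, hg', pvEmit1]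
      rw [Nat.add_comm 1 (pvIdxH r), List.drop_succ_cons]
    · have hg' : pvIsGen (PySem.Str.rstrip l) = false := by simpa [pvG] using hg
      cases hfr : pvFgbN r with
      | none => simp [pvFgbN, hg, hfr] at h
      | some p =>
        simp [pvFgbN, hg, hfr] at h
        obtain ⟨hs, he⟩ := h
        subst hs he
        simp only [pvEmit, hg', Bool.false_eq_true, if_false, if_true, List.take_succ_cons,
          List.drop_succ_cons, List.cons_append]
        rw [← ih p.1 p.2 (by simpa using hfr)]

theorem pvEmitNoGen (b : List String) (ls : List String) (h : pvFgbN ls = none) :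
    List.take (pvIdxR ls) ls ++ b ++ List.drop (pvIdxR ls) ls = pvEmit b false 0 ls := by
  induction ls with
  | nil => simp [pvEmit, pvIdxR]
  | cons l r ih =>
    have hg : pvG l = false := by
      by_contra hc
      simp [pvFgbN, Bool.of_not_eq_false hc] at h
    have hg' : pvIsGen (PySem.Str.rstrip l) = false := hg
    have hr : pvFgbN r = none := by
      simp [pvFgbN, hg, Option.map_eq_none_iff] at h; exact h
    by_cases hh : PySem.Str.startswith (PySem.Str.rstrip l) "## " = true
    · have hH : pvH l = true := by simp only [pvH, hh, hg']; rfl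
      simp only [pvEmit, reduceIte, pvIdxR, hH, if_true, Bool.false_eq_true, if_false,
        if_pos hh, pvEmit2, List.take_zero, List.drop_zero, List.nil_append]
    · have hh0 : PySem.Str.startswith (PySem.Str.rstrip l) "## " = false := by
        rwa [Bool.not_eq_true] at hh
      have hH : pvH l = false := by simp only [pvH, hh0, Bool.false_and]
      simp only [pvEmit, reduceIte, pvIdxR, hH, Bool.false_eq_true, if_false, if_neg hh,
        List.take_succ_cons, List.drop_succ_cons, List.cons_append]
      rw [← ih hr]

-- ===== VERDICT (by name: the statement is the Claim_ definition above) =====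
theorem replace_generated_sections_spec : Claim_equal_replace_generated_sections := by
  intro lines new_block _
  unfold Spec_replace_generated_sections replace_generated_sections replace_generated_sections_alt
  have hfgb := pvFgb_eq lines 0 (by omega)
  cases hfg : pvFgbN lines with
  | some p =>
    cases p with
    | mk s e =>
      rw [hfg] at hfgb
      have hgen : lines.any (fun l => pvIsGen (PySem.Str.rstrip l)) = true := by
        cases h' : lines.any (fun l => pvIsGen (PySem.Str.rstrip l)) with
        | false => rw [(pvFgbN_none_iff lines).2 h'] at hfg; cases hfg
        | true => rfl
      simp only [hfgb, zero_add, hgen]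
      rw [if_pos (show (s : Int) ≠ -1 by omega)]
      rw [PySem.List.slice_to_natCast, PySem.List.slice_from_natCast]
      exact pvEmitGen _ lines s e hfg
  | none =>
    rw [hfg] at hfgb
    have hgen : lines.any (fun l => pvIsGen (PySem.Str.rstrip l)) = false :=
      (pvFgbN_none_iff lines).1 hfg
    simp only [hfgb, hgen]
    rw [if_neg (show ¬ (-1 : Int) ≠ -1 by simp)]
    rw [pvFirstReal_eq lines 0, zero_add]
    rw [PySem.List.slice_to_natCast, PySem.List.slice_from_natCast]
    exact pvEmitNoGen _ lines hfg
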